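-- pv_equiv track=rewrite | github.com/davidar/oeisdata | verified/prog/Python/A025/A025058.py | aupto
-- ===== SOURCE A (Python) =====
-- def aupto(N):
--     alst = []
--     for i in range(1, N-1):
--         for j in range(i+1, N//i + 1):
--             p, s = i*j, i+j
--             for k in range(j+1, (N-p)//s + 1):
--                 alst.append(p + s*k)
--     return sorted(alst)
-- ===== SOURCE B (Python) =====
-- def aupto(N):
--     # counting sort: tally each generated value (all lie in [0, N]) instead of
--     # collecting them all and comparison-sorting at the end; the inner loop walks
--     # the arithmetic progression of values directly
--     counts = [0] * (N + 1)
--     for i in range(1, N-1):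
--         for j in range(i+1, N//i + 1):
--             p, s = i*j, i+j
--             for v in range(p + s*(j+1), N+1, s):
--                 counts[v] += 1
--     out = []
--     for v in range(len(counts)):
--         out.extend([v] * counts[v])
--     return out
-- ===== Notes on version B (the rewrite author's own statement) =====
-- stated objective: faster
-- what changed: B tallies each generated value into a counts array indexed by the value (all values lie in [0, N]) and emits the tallies in increasing index order — a counting sort — instead of collecting all values into a list and comparison-sorting it at the end.
import Mathlib
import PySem

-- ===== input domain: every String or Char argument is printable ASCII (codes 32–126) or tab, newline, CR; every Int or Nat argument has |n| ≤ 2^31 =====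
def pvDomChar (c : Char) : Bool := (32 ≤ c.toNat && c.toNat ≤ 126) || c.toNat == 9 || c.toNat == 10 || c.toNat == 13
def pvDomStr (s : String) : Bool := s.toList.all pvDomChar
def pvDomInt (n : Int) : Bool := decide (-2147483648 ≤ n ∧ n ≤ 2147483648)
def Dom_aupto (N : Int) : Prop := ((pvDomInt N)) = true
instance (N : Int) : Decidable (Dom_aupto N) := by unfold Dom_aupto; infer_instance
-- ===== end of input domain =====

-- B replaces A's final comparison sort by a counting sort over the value range [0, N]
-- (every generated value lies there), emitting the tallies in increasing value order.

-- ===== PORT A =====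
def aupto (N : Int) : List Int :=
  let alst : List Int :=
    (PySem.List.pyRange 1 (N-1) 1).foldl (fun alst i =>
      (PySem.List.pyRange (i+1) (PySem.Int.floordiv N i + 1) 1).foldl (fun alst j =>
        let p := i*j
        let s := i+j
        (PySem.List.pyRange (j+1) (PySem.Int.floordiv (N-p) s + 1) 1).foldl (fun alst k =>
          alst ++ [p + s*k]) alst) alst) []
  PySem.List.sorted alst (fun x => x) false

-- ===== PORT B =====
-- counts[idx] += 1 ; exact on every reachable state: B only ever increments indices
-- with 0 ≤ idx < len(counts), where Python's indexing neither wraps nor raises.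
def pvIncAt (c : List Int) (idx : Int) : List Int := c.modify idx.toNat (· + 1)

def aupto_alt (N : Int) : List Int :=
  let counts0 : List Int := List.replicate (N+1).toNat 0   -- [0] * (N+1)
  let counts : List Int :=
    (PySem.List.pyRange 1 (N-1) 1).foldl (fun c i =>
      (PySem.List.pyRange (i+1) (PySem.Int.floordiv N i + 1) 1).foldl (fun c j =>
        let p := i*j
        let s := i+j
        (PySem.List.pyRange (p + s*(j+1)) (N+1) s).foldl (fun c v =>
          pvIncAt c v) c) c) counts0
  (PySem.List.pyRange 0 (counts.length : Int) 1).foldl (fun out v =>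
    out ++ List.replicate (PySem.List.pyGetD counts v 0).toNat v) []

-- ===== PRECONDITION & SPEC =====
def Spec_aupto (N : Int) (out : List Int) : Prop := out = aupto_alt N
instance (N : Int) (out : List Int) : Decidable (Spec_aupto N out) := by unfold Spec_aupto; infer_instance

-- ===== CLAIM (what is proved, stated in full; the proofs are below) =====
def Claim_equal_aupto : Prop := ∀ (N : Int), Dom_aupto N → Spec_aupto N (aupto N)

-- ===== LEMMAS AND PROOFS =====

-- The invariant tying B's tally list to A's accumulated value list.
def pvRel (N : Int) (cnt : List Int) (l : List Int) : Prop :=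
  cnt.length = (N+1).toNat ∧
  (∀ v : Nat, v < cnt.length → cnt.getD v 0 = (l.count (v : Int) : Int)) ∧
  (∀ x ∈ l, 0 ≤ x ∧ x ≤ N)

-- generic: a relation preserved by paired steps is preserved by paired folds
theorem pvFoldlRel {α σ τ : Type} (R : σ → τ → Prop) (f : σ → α → σ) (g : τ → α → τ)
    (l : List α) (hstep : ∀ s t a, a ∈ l → R s t → R (f s a) (g t a)) :
    ∀ s t, R s t → R (l.foldl f s) (l.foldl g t) := by
  induction l with
  | nil => intro s t h; exact h
  | cons a l ih =>
    intro s t h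
    exact ih (fun s t b hb => hstep s t b (List.mem_cons_of_mem _ hb)) _ _
      (hstep s t a List.mem_cons_self h)

theorem pvRel_step (N : Int) (cnt l : List Int) (x : Int)
    (hx0 : 0 ≤ x) (hxN : x ≤ N) (h : pvRel N cnt l) :
    pvRel N (pvIncAt cnt x) (l ++ [x]) := by
  obtain ⟨hlen, hcnt, hmem⟩ := h
  refine ⟨by simpa [pvIncAt] using hlen, ?_, ?_⟩
  · intro v hv
    have hv' : v < cnt.length := by simpa [pvIncAt] using hv
    have hc : cnt[v] = (l.count (v : Int) : Int) := by
      have := hcnt v hv'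
      rwa [List.getD_eq_getElem cnt 0 hv'] at this
    have hxv : (x.toNat = v) ↔ (x = (v : Int)) := by omega
    simp only [pvIncAt]
    rw [List.getD_eq_getElem _ 0 (by simpa [pvIncAt] using hv), List.getElem_modify,
      List.count_append, List.count_singleton]
    by_cases hxe : x = (v : Int)
    · rw [if_pos (hxv.mpr hxe), if_pos (by simp [hxe]), hc]; push_cast; ring
    · rw [if_neg (fun hh => hxe (hxv.mp hh)), if_neg (by simp [hxe]), hc]; push_cast; ring
  · intro y hy
    rcases List.mem_append.mp hy with hy | hy
    · exact hmem y hy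
    · simp only [List.mem_singleton] at hy; subst hy; exact ⟨hx0, hxN⟩

-- B's inner value progression is the image of A's inner k-range
theorem pvProg (N p s j : Int) (hs : 0 < s) :
    PySem.List.pyRange (p + s*(j+1)) (N+1) s
      = (PySem.List.pyRange (j+1) ((N-p)/s + 1) 1).map (fun k => p + s*k) := by
  rw [PySem.List.pyRange_of_pos _ _ hs, PySem.List.pyRange_one, List.map_map]
  have harith : (if p + s*(j+1) < N+1 then ((N+1 - (p + s*(j+1)) + s - 1) / s).toNat else 0)
      = ((N-p)/s + 1 - (j+1)).toNat := by
    by_cases h : p + s*(j+1) < N+1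
    · rw [if_pos h]
      have ha : (0:Int) ≤ N - p - s*(j+1) := by nlinarith
      have h1 : (N - p - s*(j+1) + 1*s) / s = (N - p - s*(j+1)) / s + 1 :=
        Int.add_mul_ediv_right _ 1 hs.ne'
      have h2 : (N - p - s*(j+1) + (j+1)*s) / s = (N - p - s*(j+1)) / s + (j+1) :=
        Int.add_mul_ediv_right _ (j+1) hs.ne'
      have he : N - p - s*(j+1) + (j+1)*s = N - p := by ring
      rw [he] at h2
      have he2 : N+1 - (p + s*(j+1)) + s - 1 = N - p - s*(j+1) + 1*s := by ring
      rw [he2, h1, h2]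
      omega
    · rw [if_neg h]
      have hlt : (N - p) / s < j + 1 := by
        rw [Int.ediv_lt_iff_lt_mul hs]
        nlinarith
      omega
  rw [harith]
  exact (List.map_congr_left (fun k _ => by simp only [Function.comp_apply]; ring)).symm

theorem pvRel_loops (N : Int) :
    pvRel N
      ((PySem.List.pyRange 1 (N-1) 1).foldl (fun cnt i =>
        (PySem.List.pyRange (i+1) (PySem.Int.floordiv N i + 1) 1).foldl (fun cnt j =>
          (PySem.List.pyRange ((i*j) + (i+j)*(j+1)) (N+1) (i+j)).foldl (fun cnt v =>
            pvIncAt cnt v) cnt) cnt) (List.replicate (N+1).toNat 0))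
      ((PySem.List.pyRange 1 (N-1) 1).foldl (fun alst i =>
        (PySem.List.pyRange (i+1) (PySem.Int.floordiv N i + 1) 1).foldl (fun alst j =>
          (PySem.List.pyRange (j+1) (PySem.Int.floordiv (N-(i*j)) (i+j) + 1) 1).foldl (fun alst k =>
            alst ++ [(i*j) + (i+j)*k]) alst) alst) []) := by
  refine pvFoldlRel _ _ _ _ ?_ _ _ ⟨by simp, by intro v hv; simp, by simp⟩
  intro cnt l i hi hR
  have hi1 : 1 ≤ i := (PySem.List.mem_pyRange_one.mp hi).1
  refine pvFoldlRel _ _ _ _ ?_ _ _ hR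
  intro cnt l j hj hR
  have hj1 : i + 1 ≤ j := (PySem.List.mem_pyRange_one.mp hj).1
  have hs : (0:Int) < i + j := by omega
  have hfd : PySem.Int.floordiv (N - i*j) (i+j) = (N - i*j) / (i+j) :=
    PySem.Int.floordiv_eq_ediv_of_pos hs
  rw [pvProg N (i*j) (i+j) j hs, List.foldl_map, hfd]
  refine pvFoldlRel _ _ _ _ ?_ _ _ hR
  intro cnt l k hk hR
  obtain ⟨hk1, hk2⟩ := PySem.List.mem_pyRange_one.mp hk
  have hk3 : k ≤ (N - i*j) / (i+j) := by omega
  have hmul : k * (i+j) ≤ N - i*j := (Int.le_ediv_iff_mul_le hs).mp hk3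
  have hub : i*j + (i+j)*k ≤ N := by nlinarith
  have hlb : 0 ≤ i*j + (i+j)*k := by nlinarith
  exact pvRel_step N cnt l _ hlb hub hR

theorem pvCount_flatMap_aux (m : Int → Nat) (x : Int) : ∀ (n : Nat) (a : Int),
    ((PySem.List.pyRange a (a+n) 1).flatMap (fun v => List.replicate (m v) v)).count x
      = if a ≤ x ∧ x < a+n then m x else 0 := by
  intro n
  induction n with
  | zero =>
    intro a
    rw [PySem.List.pyRange_one_eq_nil (by omega), List.flatMap_nil, List.count_nil,
      if_neg (by omega)]
  | succ n ih =>
    intro a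
    rw [PySem.List.pyRange_one_cons (by omega), List.flatMap_cons, List.count_append,
      List.count_replicate]
    have hih := ih (a+1)
    rw [show ((a:Int) + 1 + (n:Nat)) = a + ((n:Nat)+1 : Nat) by push_cast; ring] at hih
    rw [hih]
    by_cases hax : a = x
    · rw [if_pos (by simp [hax]), if_neg (by omega), if_pos (by omega), Nat.add_zero, hax]
    · rw [if_neg (by simp [hax])]
      by_cases h1 : a + 1 ≤ x ∧ x < a + (((n:Nat)+1 : Nat) : Int)
      · rw [if_pos h1, if_pos (by omega), Nat.zero_add]
      · rw [if_neg h1, if_neg (by omega)]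

theorem pvCount_flatMap (m : Int → Nat) (x : Int) (a b : Int) :
    ((PySem.List.pyRange a b 1).flatMap (fun v => List.replicate (m v) v)).count x
      = if a ≤ x ∧ x < b then m x else 0 := by
  by_cases hab : a ≤ b
  · have := pvCount_flatMap_aux m x (b-a).toNat a
    rw [show a + ((b-a).toNat : Int) = b by omega] at this
    exact this
  · rw [PySem.List.pyRange_one_eq_nil (by omega), List.flatMap_nil, List.count_nil,
      if_neg (by omega)]

theorem pvPairwise_flatMap_aux (m : Int → Nat) : ∀ (n : Nat) (a : Int),
    ((PySem.List.pyRange a (a+n) 1).flatMap (fun v => List.replicate (m v) v)).Pairwise (· ≤ ·) := by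
  intro n
  induction n with
  | zero => intro a; rw [PySem.List.pyRange_one_eq_nil (by omega)]; simp
  | succ n ih =>
    intro a
    rw [PySem.List.pyRange_one_cons (by omega), List.flatMap_cons]
    have hrest := ih (a+1)
    rw [show ((a:Int) + 1 + (n:Nat)) = a + ((n:Nat)+1 : Nat) by push_cast; ring] at hrest
    refine List.pairwise_append.mpr ⟨List.pairwise_replicate.mpr (Or.inr le_rfl), hrest, ?_⟩
    intro y hy z hz
    have hya : y = a := List.eq_of_mem_replicate hy
    obtain ⟨v, hv, hzv⟩ := List.mem_flatMap.mp hz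
    have hzv' : z = v := List.eq_of_mem_replicate hzv
    have := (PySem.List.mem_pyRange_one.mp hv).1
    omega

theorem pvPairwise_flatMap (m : Int → Nat) (a b : Int) :
    ((PySem.List.pyRange a b 1).flatMap (fun v => List.replicate (m v) v)).Pairwise (· ≤ ·) := by
  by_cases hab : a ≤ b
  · have := pvPairwise_flatMap_aux m (b-a).toNat a
    rw [show a + ((b-a).toNat : Int) = b by omega] at this
    exact this
  · rw [PySem.List.pyRange_one_eq_nil (by omega)]; simp

theorem pvOut_eq_sorted (N : Int) (cnt l : List Int) (h : pvRel N cnt l) :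
    (PySem.List.pyRange 0 (cnt.length : Int) 1).foldl (fun out v =>
        out ++ List.replicate (PySem.List.pyGetD cnt v 0).toNat v) []
      = PySem.List.sorted l (fun x => x) false := by
  obtain ⟨hlen, hcnt, hmem⟩ := h
  rw [PySem.List.foldl_append_eq_flatMap, List.nil_append]
  refine (PySem.List.sorted_id_eq_of_perm_of_pairwise l _ ?_ (pvPairwise_flatMap _ 0 _)).symm
  refine List.perm_iff_count.mpr ?_
  intro x
  rw [pvCount_flatMap]
  by_cases hx : 0 ≤ x ∧ x < (cnt.length : Int)
  · rw [if_pos hx]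
    have hxn : x.toNat < cnt.length := by omega
    rw [PySem.List.pyGetD_eq_getElem cnt 0 hx.1 hx.2]
    have := hcnt x.toNat hxn
    rw [List.getD_eq_getElem cnt 0 hxn] at this
    rw [this, show ((x.toNat : Int)) = x by omega, Int.toNat_natCast]
  · rw [if_neg hx]
    symm
    rw [List.count_eq_zero]
    intro hxl
    have := hmem x hxl
    omega

-- ===== VERDICT (by name: the statement is the Claim_ definition above) =====
theorem aupto_spec : Claim_equal_aupto := by
  intro N _
  unfold Spec_aupto aupto aupto_alt
  exact (pvOut_eq_sorted N _ _ (pvRel_loops N)).symm
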